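-- pv_equiv track=rewrite | github.com/johnneed/Nature-of-Computation | bridgesOfKonigsberg.py | __start_paths
-- ===== SOURCE A (Python) =====
-- def __start_paths(edge_sets: list) -> list:
--     if len(edge_sets) == 0:
--         return []
--     edges = edge_sets[0]
--     current_vertex = edges[0][0]
--     path_start = [current_vertex]
--     path = __create_path(edges, path_start)
--     if len(path) == len(edges) + 1:
--         return path
--     return __start_paths(edge_sets[1:])
--
-- def __create_path(edges: list, path: list) -> list:
--     current_vertex = path[-1]
--     possible_exits = list(filter(lambda edge: (edge[0] == current_vertex or edge[1] == current_vertex), edges))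
--     if len(possible_exits) == 0:
--         return path
--     my_exit = possible_exits[0]
--     next_vertex = my_exit[0] if (my_exit[0] != current_vertex) else my_exit[1]
--     path = path + [next_vertex]
--     index = edges.index(my_exit)
--     remaining_edges = edges[0:index] + edges[index + 1:]
--     return path if len(remaining_edges) == 0 else __create_path(remaining_edges, path)
-- ===== SOURCE B (Python) =====
-- def __start_paths(edge_sets: list) -> list:
--     for edges in edge_sets:
--         n = len(edges)
--         # build once: vertex -> ascending list of incident edge indices (one entry per edge)
--         inc = []
--         for i, (u, v) in enumerate(edges):
--             inc.append((u, i))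
--             if v != u:
--                 inc.append((v, i))
--         adj = {}
--         for (w, i) in inc:
--             adj[w] = adj.get(w, []) + [i]
--         ptr = {}
--         removed = [False] * n
--         cur = edges[0][0]
--         path = [cur]
--         for _ in range(n):
--             lst = adj.get(cur)
--             if lst is None:
--                 break
--             p = ptr.get(cur, 0)
--             while p < len(lst) and removed[lst[p]]:
--                 p += 1
--             if p == len(lst):
--                 break
--             i = lst[p]
--             ptr[cur] = p + 1
--             removed[i] = True
--             u, v = edges[i]
--             cur = v if u == cur else u
--             path.append(cur)
--         if len(path) == n + 1:
--             return path
--     return []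
-- ===== Notes on version B (the rewrite author's own statement) =====
-- stated objective: faster
-- what changed: B builds, once per edge set, a per-vertex index of incident edge positions and consumes it with lazy deletion (a removed-flags array plus per-vertex pointers), replacing A's per-step filter + list.index + two-slice rescans of the remaining edge list.
-- outside the precondition, e.g. on __start_paths([[(1, 2)], []]): A returns [1, 2], B returns [1, 2]
import Mathlib
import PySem

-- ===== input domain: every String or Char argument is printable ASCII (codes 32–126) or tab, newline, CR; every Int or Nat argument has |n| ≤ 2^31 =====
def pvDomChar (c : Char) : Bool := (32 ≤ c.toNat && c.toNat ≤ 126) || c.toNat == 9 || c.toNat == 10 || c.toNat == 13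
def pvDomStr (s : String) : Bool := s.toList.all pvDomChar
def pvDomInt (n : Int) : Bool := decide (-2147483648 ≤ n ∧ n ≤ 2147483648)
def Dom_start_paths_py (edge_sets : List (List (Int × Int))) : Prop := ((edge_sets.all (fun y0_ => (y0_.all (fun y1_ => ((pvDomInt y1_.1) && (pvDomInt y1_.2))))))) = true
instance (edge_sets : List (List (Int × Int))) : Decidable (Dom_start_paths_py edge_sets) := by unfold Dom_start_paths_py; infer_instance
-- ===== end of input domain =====

-- B replaces A's per-step rescans (filter + list.index + two slices over the remaining edge
-- list) by a per-vertex index of incident edge positions built once, consumed with lazy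
-- deletion; objective: faster (measured on the timing inputs).
-- NOTE on side effects: neither version mutates its argument; B mutates only its own locals.

-- ===== PORT A =====
-- __create_path, with fuel = edges.length (the recursion removes one edge per call, so this
-- fuel is never exhausted before the Python recursion ends; at fuel 0 edges = [] and the
-- Python call would return path through its empty-filter branch, which is what we return).
def pvCreatePath : Nat → List (Int × Int) → List Int → List Int
  | 0, _, path => path
  | fuel+1, edges, path =>
    match PySem.List.pyGet? path (-1) with
    | none => path   -- unreachable: path is never empty at any call site (Python would raise IndexError)
    | some current =>
      let possible_exits := edges.filter (fun e => e.1 == current || e.2 == current)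
      match possible_exits with
      | [] => path
      | my_exit :: _ =>
        let next_vertex := if my_exit.1 != current then my_exit.1 else my_exit.2
        let path' := path ++ [next_vertex]
        match PySem.List.index? edges my_exit with
        | none => path'   -- unreachable: my_exit ∈ edges, list.index cannot raise here
        | some idx =>
          let remaining := PySem.List.slice edges (some 0) (some (idx : Int)) ++
                           PySem.List.slice edges (some ((idx : Int) + 1)) none
          if remaining = [] then path' else pvCreatePath fuel remaining path'

def start_paths_py (edge_sets : List (List (Int × Int))) : List Int :=
  match edge_sets with
  | [] => []
  | edges :: rest =>
    match edges with
    | [] => []   -- unreachable under Pre_: Python raises IndexError at edges[0][0]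
    | (a, _) :: _ =>
      let path := pvCreatePath edges.length edges [a]
      if path.length = edges.length + 1 then path
      else start_paths_py rest

-- ===== PORT B =====
-- 'while p < len(lst) and removed[lst[p]]: p += 1', fuel = lst.length (enough: p starts ≥ 0
-- and each iteration needs p < len(lst)).  Indices in lst are always in range of removed in
-- every reachable state, so pyGetD's defaults are never used.
def pvSkip (removed : List Bool) (lst : List Int) : Nat → Int → Int
  | 0, p => p
  | fuel+1, p =>
    if (decide (p < (lst.length : Int)) &&
        PySem.List.pyGetD removed (PySem.List.pyGetD lst p 0) false) then
      pvSkip removed lst fuel (p+1)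
    else p

-- the 'for _ in range(n)' loop of Source B
def pvBLoop (edges : List (Int × Int)) (adj : PySem.Dict Int (List Int)) :
    Nat → PySem.Dict Int Int → List Bool → Int → List Int → List Int
  | 0, _, _, _, path => path
  | k+1, ptr, removed, cur, path =>
    match adj.get? cur with
    | none => path
    | some lst =>
      let p := pvSkip removed lst lst.length (ptr.getD cur 0)
      if p = (lst.length : Int) then path
      else
        let i := PySem.List.pyGetD lst p 0
        let ptr' := ptr.insert cur (p + 1)
        let removed' := PySem.List.pySetD removed i true
        let e := PySem.List.pyGetD edges i (0, 0)
        let cur' := if e.1 == cur then e.2 else e.1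
        pvBLoop edges adj k ptr' removed' cur' (path ++ [cur'])

-- one edge set of Source B: build inc and adj, then run the loop
def pvBOne (edges : List (Int × Int)) : List Int :=
  let n := edges.length
  let inc := (PySem.List.enumerate edges).foldl
    (fun acc q => acc ++ (if q.2.2 != q.2.1 then [(q.2.1, q.1), (q.2.2, q.1)] else [(q.2.1, q.1)])) []
  let adj := inc.foldl (fun d q => d.modify q.1 [] (· ++ [q.2])) PySem.Dict.empty
  match edges with
  | [] => []   -- unreachable under Pre_: Python raises IndexError at edges[0][0]
  | (a, _) :: _ =>
    pvBLoop edges adj n PySem.Dict.empty (List.replicate n false) a [a]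

def start_paths_py_alt (edge_sets : List (List (Int × Int))) : List Int :=
  match edge_sets with
  | [] => []
  | edges :: rest =>
    let path := pvBOne edges
    if path.length = edges.length + 1 then path
    else start_paths_py_alt rest

-- ===== PRECONDITION & SPEC =====
-- Pre_ excludes inputs containing an empty edge list: when A's recursion reaches such a list
-- it raises IndexError at edges[0][0] (and B raises identically there); this also excludes
-- some inputs where an earlier edge set succeeds before the empty one is reached — on those
-- both programs return the same value (see claim.json cites).
def Pre_start_paths_py (edge_sets : List (List (Int × Int))) : Prop :=
  ∀ es ∈ edge_sets, es ≠ []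
instance (edge_sets : List (List (Int × Int))) : Decidable (Pre_start_paths_py edge_sets) := by
  unfold Pre_start_paths_py; infer_instance

def pvWitness_start_paths_py : (List (List (Int × Int))) := [[(1, 2), (2, 3)]]

def Spec_start_paths_py (edge_sets : List (List (Int × Int))) (out : List Int) : Prop := out = start_paths_py_alt edge_sets
instance (edge_sets : List (List (Int × Int))) (out : List Int) : Decidable (Spec_start_paths_py edge_sets out) := by unfold Spec_start_paths_py; infer_instance

-- ===== CLAIM (what is proved, stated in full; the proofs are below) =====
def Claim_equal_start_paths_py : Prop := ∀ (edge_sets : List (List (Int × Int))), Dom_start_paths_py edge_sets → Pre_start_paths_py edge_sets → Spec_start_paths_py edge_sets (start_paths_py edge_sets)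

-- ===== LEMMAS AND PROOFS =====

-- ---- ghost definitions used only by the proofs ----

-- indices (as Python ints) of the edges incident to w, in ascending order
def pvInc (E : List (Int × Int)) (w : Int) : List Int :=
  ((PySem.List.enumerate E).filter (fun q => q.2.1 == w || q.2.2 == w)).map (·.1)

-- "index i is not yet removed"
def pvLive (removed : List Bool) (i : Int) : Bool := !(PySem.List.pyGetD removed i false)

-- the still-present (index, edge) pairs, in order
def pvLiveAll (E : List (Int × Int)) (removed : List Bool) : List (Int × (Int × Int)) :=
  (PySem.List.enumerate E).filter (fun q => pvLive removed q.1)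

-- the remaining edges, in order (A's working list)
def pvRem (E : List (Int × Int)) (removed : List Bool) : List (Int × Int) :=
  (pvLiveAll E removed).map (·.2)

-- the pointer invariant of B: every entry of pvInc E w before ptr[w] is removed
def pvPtrInv (E : List (Int × Int)) (ptr : PySem.Dict Int Int) (removed : List Bool) : Prop :=
  ∀ w : Int, ∃ m : Nat, ptr.getD w 0 = (m : Int) ∧ m ≤ (pvInc E w).length ∧
    ∀ j : Nat, j < m → PySem.List.pyGetD removed (PySem.List.pyGetD (pvInc E w) (j : Int) 0) false = true

-- ---- facts about the adjacency build of B ----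

theorem pv_inc_flatMap (w : Int) (l : List (Int × (Int × Int))) :
    ((l.flatMap (fun q => if q.2.2 != q.2.1 then [(q.2.1, q.1), (q.2.2, q.1)] else [(q.2.1, q.1)])).filter
        (fun q => q.1 == w)).map (·.2)
      = (l.filter (fun q => q.2.1 == w || q.2.2 == w)).map (·.1) := by
  induction l with
  | nil => simp
  | cons a as ih =>
    rcases a with ⟨i, u, v⟩
    rw [List.flatMap_cons, List.filter_append, List.map_append, ih, List.filter_cons]
    by_cases h1 : v = u
    · subst h1
      by_cases h2 : v = w
      · subst h2; simp
      · simp [h2]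
    · by_cases h2 : u = w
      · have h3 : ¬ (v = w) := fun h => h1 (h.trans h2.symm)
        simp [h2, h3]
      · by_cases h3 : v = w
        · have h4 : ¬ (w = u) := fun h => h1 (h3.trans h)
          simp [h2, h3, h4]
        · simp [h1, h2, h3]

theorem pv_adj_getD (E : List (Int × Int)) (w : Int) :
    (((PySem.List.enumerate E).foldl
        (fun acc q => acc ++ (if q.2.2 != q.2.1 then [(q.2.1, q.1), (q.2.2, q.1)] else [(q.2.1, q.1)])) []).foldl
        (fun d q => d.modify q.1 [] (· ++ [q.2])) PySem.Dict.empty).getD w []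
      = pvInc E w := by
  rw [PySem.List.foldl_append_eq_flatMap, List.nil_append,
      PySem.Dict.getD_foldl_modify_append, PySem.Dict.getD_empty, List.nil_append]
  exact pv_inc_flatMap w _

-- ---- generic list facts ----

theorem pv_first_filter_decomp {α : Type} (p : α → Bool) :
    ∀ (l : List α) (x : α), (l.filter p).head? = some x →
      ∃ l1 l2, l = l1 ++ x :: l2 ∧ (∀ y ∈ l1, p y = false) ∧ p x = true := by
  intro l
  induction l with
  | nil => intro x h; simp at h
  | cons a as ih =>
    intro x h
    by_cases hp : p a = true
    · rw [List.filter_cons_of_pos hp] at h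
      simp only [List.head?_cons, Option.some.injEq] at h
      exact ⟨[], as, by simp [h], by simp, h ▸ hp⟩
    · rw [List.filter_cons_of_neg hp] at h
      obtain ⟨l1, l2, rfl, h1, h2⟩ := ih x h
      refine ⟨a :: l1, l2, rfl, ?_, h2⟩
      intro y hy
      rcases List.mem_cons.mp hy with rfl | hy
      · exact Bool.eq_false_iff.mpr hp
      · exact h1 y hy

theorem pv_head?_filter_of_prefix {α : Type} (p : α → Bool) :
    ∀ (l : List α) (m : Nat) (hm : m < l.length),
      (∀ j : Nat, (hj : j < m) → p (l[j]'(by omega)) = false) → p (l[m]) = true →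
      (l.filter p).head? = some l[m] := by
  intro l
  induction l with
  | nil => intro m hm; simp at hm
  | cons a as ih =>
    intro m hm hpre hx
    match m with
    | 0 =>
      simp only [List.getElem_cons_zero] at hx ⊢
      rw [List.filter_cons_of_pos hx]
      simp
    | m + 1 =>
      have h0 : p a = false := by
        have := hpre 0 (by omega)
        simpa using this
      rw [List.filter_cons_of_neg (by simp [h0])]
      simp only [List.getElem_cons_succ] at hx ⊢
      exact ih m (by simpa using hm) (fun j hj => by simpa using hpre (j+1) (by omega)) hx

-- ---- enumerate / liveAll facts ----

theorem pv_mem_enumerate {E : List (Int × Int)} {q : Int × (Int × Int)}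
    (h : q ∈ PySem.List.enumerate E) :
    0 ≤ q.1 ∧ q.1 < (E.length : Int) ∧ PySem.List.pyGetD E q.1 (0, 0) = q.2 := by
  rw [PySem.List.mem_enumerate_iff] at h
  obtain ⟨k, hk, rfl⟩ := h
  refine ⟨by simp, by simpa using hk, ?_⟩
  simp [PySem.List.pyGetD_natCast, List.getD_eq_getElem?_getD, hk]

theorem pv_liveAll_pairwise (E : List (Int × Int)) (removed : List Bool) :
    (pvLiveAll E removed).Pairwise (fun p q => p.1 < q.1) := by
  exact (PySem.List.pairwise_lt_enumerate E 0).filter _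

-- A's filter over the remaining edges, expressed through B's incidence list
theorem pv_rem_filter (E : List (Int × Int)) (removed : List Bool) (cur : Int) :
    (pvRem E removed).filter (fun e : Int × Int => e.1 == cur || e.2 == cur)
      = ((pvLiveAll E removed).filter (fun q : Int × (Int × Int) => q.2.1 == cur || q.2.2 == cur)).map (·.2) := by
  unfold pvRem
  rw [List.filter_map]
  rfl

theorem pv_live_inc (E : List (Int × Int)) (removed : List Bool) (cur : Int) :
    (pvInc E cur).filter (pvLive removed)
      = ((pvLiveAll E removed).filter (fun q : Int × (Int × Int) => q.2.1 == cur || q.2.2 == cur)).map (·.1) := by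
  unfold pvInc pvLiveAll
  rw [List.filter_map]
  congr 1
  rw [List.filter_filter, List.filter_filter]
  exact List.filter_congr (by intro x _; rw [Bool.and_comm]; rfl)

-- ---- the while-loop of B ----

theorem pv_skip_spec (removed : List Bool) (lst : List Int) :
    ∀ (fuel m : Nat), lst.length ≤ m + fuel → m ≤ lst.length →
      (∀ j : Nat, j < m → PySem.List.pyGetD removed (PySem.List.pyGetD lst (j : Int) 0) false = true) →
      ∃ m2 : Nat, pvSkip removed lst fuel (m : Int) = (m2 : Int) ∧ m2 ≤ lst.length ∧
        (∀ j : Nat, j < m2 → PySem.List.pyGetD removed (PySem.List.pyGetD lst (j : Int) 0) false = true) ∧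
        (m2 < lst.length → PySem.List.pyGetD removed (PySem.List.pyGetD lst (m2 : Int) 0) false = false) := by
  intro fuel
  induction fuel with
  | zero =>
    intro m h1 h2 h3
    exact ⟨m, by simp [pvSkip], h2, h3, fun h => absurd h (by omega)⟩
  | succ f ih =>
    intro m h1 h2 h3
    by_cases hm : m < lst.length
    · by_cases hr : PySem.List.pyGetD removed (PySem.List.pyGetD lst (m : Int) 0) false = true
      · have hguard : (decide ((m : Int) < (lst.length : Int)) &&
            PySem.List.pyGetD removed (PySem.List.pyGetD lst (m : Int) 0) false) = true := by
          rw [hr]; simp; exact_mod_cast hm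
        have step : pvSkip removed lst (f+1) (m : Int) = pvSkip removed lst f ((m : Int) + 1) := by
          rw [pvSkip, hguard]; simp
        have hc : ((m : Int) + 1) = ((m + 1 : Nat) : Int) := by push_cast; ring
        obtain ⟨m2, e, b1, b2, b3⟩ := ih (m+1) (by omega) (by omega) (fun j hj => by
          rcases Nat.lt_succ_iff_lt_or_eq.mp hj with h | h
          · exact h3 j h
          · subst h; exact hr)
        exact ⟨m2, by rw [step, hc, e], b1, b2, b3⟩
      · have hguard : (decide ((m : Int) < (lst.length : Int)) &&
            PySem.List.pyGetD removed (PySem.List.pyGetD lst (m : Int) 0) false) = false := by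
          rw [Bool.eq_false_iff.mpr hr]; simp
        have step : pvSkip removed lst (f+1) (m : Int) = (m : Int) := by
          rw [pvSkip, hguard]; simp
        exact ⟨m, step, h2, h3, fun _ => Bool.eq_false_iff.mpr hr⟩
    · have hguard : (decide ((m : Int) < (lst.length : Int)) &&
          PySem.List.pyGetD removed (PySem.List.pyGetD lst (m : Int) 0) false) = false := by
        have : ¬ ((m : Int) < (lst.length : Int)) := by exact_mod_cast hm
        simp [this]
      have step : pvSkip removed lst (f+1) (m : Int) = (m : Int) := by
        rw [pvSkip, hguard]; simp
      exact ⟨m, step, h2, h3, fun h => absurd h (by omega)⟩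

theorem pv_filter_of_all_removed (removed : List Bool) (lst : List Int)
    (h : ∀ j : Nat, j < lst.length → PySem.List.pyGetD removed (PySem.List.pyGetD lst (j : Int) 0) false = true) :
    lst.filter (pvLive removed) = [] := by
  rw [List.filter_eq_nil_iff]
  intro a ha
  obtain ⟨j, hj, rfl⟩ := List.mem_iff_getElem.mp ha
  have := h j hj
  have hg : PySem.List.pyGetD lst (j : Int) 0 = lst[j] := by
    simp [PySem.List.pyGetD_natCast, List.getD_eq_getElem?_getD, hj]
  rw [hg] at this
  simp [pvLive, this]

-- small indexing helpers
theorem pv_getD_nat (lst : List Int) (j : Nat) (hj : j < lst.length) :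
    PySem.List.pyGetD lst (j : Int) 0 = lst[j] := by
  simp [PySem.List.pyGetD_natCast, List.getD_eq_getElem?_getD, hj]

theorem pv_getD_setD (removed : List Bool) (n : Nat) (hn : n < removed.length)
    (x : Int) (hx : 0 ≤ x) :
    PySem.List.pyGetD (PySem.List.pySetD removed (n : Int) true) x false
      = if x = (n : Int) then true else PySem.List.pyGetD removed x false := by
  obtain ⟨m, rfl⟩ : ∃ m : Nat, x = (m : Int) := ⟨x.toNat, (Int.toNat_of_nonneg hx).symm⟩
  rw [PySem.List.pyGetD_pySetD_natCast removed n m true false hn]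
  by_cases h : m = n
  · simp [h]
  · have h2 : ¬ ((m : Int) = (n : Int)) := by exact_mod_cast h
    simp [h, h2]

theorem pv_pyGetD_replicate_false (n : Nat) (i : Int) :
    PySem.List.pyGetD (List.replicate n false) i false = false := by
  rcases h : PySem.List.pyGet? (List.replicate n false) i with _ | x
  · simp [PySem.List.pyGetD, h]
  · have hx : x = false := List.eq_of_mem_replicate (PySem.List.mem_of_pyGet?_eq_some _ h)
    subst hx
    simp [PySem.List.pyGetD, h]

-- ---- the main simulation ----

theorem pv_loop (E : List (Int × Int)) (adj : PySem.Dict Int (List Int))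
    (hadj : ∀ w, adj.getD w [] = pvInc E w) :
    ∀ (k : Nat) (removed : List Bool) (ptr : PySem.Dict Int Int) (cur : Int) (path : List Int),
      removed.length = E.length →
      (pvRem E removed).length = k →
      PySem.List.pyGet? path (-1) = some cur →
      pvPtrInv E ptr removed →
      pvCreatePath k (pvRem E removed) path = pvBLoop E adj k ptr removed cur path := by
  intro k
  induction k with
  | zero =>
    intro removed ptr cur path _ _ _ _
    rfl
  | succ k ih =>
    intro removed ptr cur path hlen hk hpath hinv
    rcases hget : adj.get? cur with _ | lst
    · -- cur has no incident edges at all: both sides stop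
      have hinc : pvInc E cur = [] := by
        rw [← hadj cur, PySem.Dict.getD_eq_get?_getD, hget]; rfl
      have hPempty : ((pvLiveAll E removed).filter
          (fun q : Int × (Int × Int) => q.2.1 == cur || q.2.2 == cur)) = [] := by
        have h1 := pv_live_inc E removed cur
        rw [hinc] at h1
        exact List.map_eq_nil_iff.mp h1.symm
      have hfe : (pvRem E removed).filter (fun e : Int × Int => e.1 == cur || e.2 == cur) = [] := by
        rw [pv_rem_filter, hPempty]; rfl
      rw [pvBLoop, hget, pvCreatePath, hpath]
      simp only [hfe]
    · have hlst : lst = pvInc E cur := by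
        have h := hadj cur
        rw [PySem.Dict.getD_eq_get?_getD, hget] at h
        exact h
      obtain ⟨m, hm, hmle, hmrem⟩ := hinv cur
      rw [← hlst] at hmle hmrem
      obtain ⟨m2, hstep, hm2le, hall, hlive⟩ :=
        pv_skip_spec removed lst lst.length m (by omega) hmle hmrem
      rw [pvBLoop, hget]
      simp only [hm, hstep]
      by_cases hend : m2 = lst.length
      · -- all incident edges removed: B breaks, A's filter is empty
        have hfl : lst.filter (pvLive removed) = [] :=
          pv_filter_of_all_removed removed lst (fun j hj => hall j (by omega))
        have hPempty : ((pvLiveAll E removed).filter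
            (fun q : Int × (Int × Int) => q.2.1 == cur || q.2.2 == cur)) = [] := by
          have h1 := pv_live_inc E removed cur
          rw [← hlst, hfl] at h1
          exact List.map_eq_nil_iff.mp h1.symm
        have hfe : (pvRem E removed).filter (fun e : Int × Int => e.1 == cur || e.2 == cur) = [] := by
          rw [pv_rem_filter, hPempty]; rfl
        have hcast : ((m2 : Int) = (lst.length : Int)) := by exact_mod_cast hend
        rw [if_pos hcast, pvCreatePath, hpath]
        simp only [hfe]
      · -- B picks index i = lst[m2]; A picks the same edge
        have hm2lt : m2 < lst.length := by omega
        have hcast : ¬ ((m2 : Int) = (lst.length : Int)) := by exact_mod_cast hend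
        rw [if_neg hcast]
        have hi : PySem.List.pyGetD lst (m2 : Int) 0 = lst[m2] := pv_getD_nat lst m2 hm2lt
        have hhead : (lst.filter (pvLive removed)).head? = some lst[m2] := by
          apply pv_head?_filter_of_prefix
          · intro j hj
            have h := hall j (by omega)
            rw [pv_getD_nat lst j (by omega)] at h
            simp [pvLive, h]
          · have h := hlive hm2lt
            rw [hi] at h
            simp [pvLive, h]
        have hmap := pv_live_inc E removed cur
        rw [← hlst] at hmap
        rw [hmap, List.head?_map] at hhead
        rcases hLhead : ((pvLiveAll E removed).filter
            (fun q : Int × (Int × Int) => q.2.1 == cur || q.2.2 == cur)).head? with _ | x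
        · rw [hLhead] at hhead; simp at hhead
        rw [hLhead] at hhead
        have hx1 : x.1 = lst[m2] := by simpa using hhead
        obtain ⟨L1, L2, hdec, hL1, hPx⟩ := pv_first_filter_decomp _ _ x hLhead
        have hxe : x ∈ PySem.List.enumerate E := by
          have hx : x ∈ pvLiveAll E removed := by rw [hdec]; simp
          exact List.mem_of_mem_filter hx
        obtain ⟨hx0, hxlt, hxE⟩ := pv_mem_enumerate hxe
        obtain ⟨ix, hix⟩ : ∃ n : Nat, x.1 = (n : Int) := ⟨x.1.toNat, (Int.toNat_of_nonneg hx0).symm⟩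
        have hixlt : ix < E.length := by rw [hix] at hxlt; exact_mod_cast hxlt
        -- A's filter result
        have hL1f : L1.filter (fun q : Int × (Int × Int) => q.2.1 == cur || q.2.2 == cur) = [] :=
          List.filter_eq_nil_iff.mpr (fun a ha => by simp [hL1 a ha])
        have hfe : (pvRem E removed).filter (fun e : Int × Int => e.1 == cur || e.2 == cur)
            = x.2 :: (L2.filter (fun q : Int × (Int × Int) => q.2.1 == cur || q.2.2 == cur)).map (·.2) := by
          rw [pv_rem_filter, hdec, List.filter_append, hL1f]
          simp [hPx]
        have hrem : pvRem E removed = L1.map (·.2) ++ x.2 :: L2.map (·.2) := by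
          unfold pvRem; rw [hdec]; simp
        -- list.index finds the same edge
        have hnotin : x.2 ∉ L1.map (·.2) := by
          intro hmem
          obtain ⟨y, hy, hy2⟩ := List.mem_map.mp hmem
          have hPy : (y.2.1 == cur || y.2.2 == cur) = true := by rw [hy2]; exact hPx
          rw [hL1 y hy] at hPy
          exact Bool.false_ne_true hPy
        have hidx : PySem.List.index? (pvRem E removed) x.2 = some L1.length :=
          (PySem.List.index?_eq_some_iff _ _ _).mpr
            ⟨L1.map (·.2), L2.map (·.2), hrem, by simp, hnotin⟩
        -- the two slices erase exactly that edge
        have hslice : PySem.List.slice (pvRem E removed) (some (0 : Int)) (some (L1.length : Int)) ++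
            PySem.List.slice (pvRem E removed) (some ((L1.length : Int) + 1)) none
            = L1.map (·.2) ++ L2.map (·.2) := by
          rw [PySem.List.slice_zero_start, PySem.List.slice_to_natCast]
          have hc : ((L1.length : Int) + 1) = ((L1.length + 1 : Nat) : Int) := by push_cast; ring
          rw [hc, PySem.List.slice_from_natCast, hrem, List.take_left' (by simp)]
          have hsplit : L1.map (·.2) ++ x.2 :: L2.map (·.2)
              = (L1.map (·.2) ++ [x.2]) ++ L2.map (·.2) := by simp
          rw [hsplit, List.drop_left' (by simp)]
        -- the new removed array
        have hsetlen : ix < removed.length := by rw [hlen]; exact hixlt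
        have hmono : ∀ z : Int, 0 ≤ z → PySem.List.pyGetD removed z false = true →
            PySem.List.pyGetD (PySem.List.pySetD removed (ix : Int) true) z false = true := by
          intro z hz h
          rw [pv_getD_setD removed ix hsetlen z hz]
          by_cases hzz : z = (ix : Int) <;> simp [hzz, h]
        have hpw := pv_liveAll_pairwise E removed
        rw [hdec] at hpw
        obtain ⟨hpwL1, hpwR, hpwC⟩ := List.pairwise_append.mp hpw
        have hLA' : pvLiveAll E (PySem.List.pySetD removed (ix : Int) true) = L1 ++ L2 := by
          unfold pvLiveAll
          have step1 : (PySem.List.enumerate E).filter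
                (fun q => pvLive (PySem.List.pySetD removed (ix : Int) true) q.1)
              = (PySem.List.enumerate E).filter
                (fun q => pvLive removed q.1 && (q.1 != (ix : Int))) := by
            apply List.filter_congr
            intro z hz
            have hz0 := (pv_mem_enumerate hz).1
            unfold pvLive
            rw [pv_getD_setD removed ix hsetlen z.1 hz0]
            by_cases hzz : z.1 = (ix : Int) <;> simp [hzz]
          rw [step1]
          have step2 : (PySem.List.enumerate E).filter
                (fun q => pvLive removed q.1 && (q.1 != (ix : Int)))
              = (pvLiveAll E removed).filter (fun q => q.1 != (ix : Int)) := by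
            unfold pvLiveAll
            rw [List.filter_filter]
            exact List.filter_congr (fun z _ => by rw [Bool.and_comm])
          rw [step2, hdec, List.filter_append, List.filter_cons]
          have hxx : (x.1 != (ix : Int)) = false := by simp [hix]
          rw [hxx]
          have hkeep1 : L1.filter (fun q => q.1 != (ix : Int)) = L1 := by
            apply List.filter_eq_self.mpr
            intro y hy
            have := hpwC y hy x (by simp)
            simp only [bne_iff_ne, ne_eq]
            intro hcontra
            rw [hcontra, ← hix] at this
            omega
          have hkeep2 : L2.filter (fun q => q.1 != (ix : Int)) = L2 := by
            apply List.filter_eq_self.mpr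
            intro y hy
            have := (List.pairwise_cons.mp hpwR).1 y hy
            simp only [bne_iff_ne, ne_eq]
            intro hcontra
            rw [hcontra, ← hix] at this
            omega
          rw [hkeep1, hkeep2]
          simp
        have hrem' : pvRem E (PySem.List.pySetD removed (ix : Int) true)
            = L1.map (·.2) ++ L2.map (·.2) := by
          unfold pvRem; rw [hLA']; simp
        have hk' : (pvRem E (PySem.List.pySetD removed (ix : Int) true)).length = k := by
          have h1 := hk
          rw [hrem] at h1
          rw [hrem']
          simp only [List.length_append, List.length_map, List.length_cons] at h1 ⊢
          omega
        have hlen' : (PySem.List.pySetD removed (ix : Int) true).length = E.length := by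
          rw [PySem.List.length_pySetD]; exact hlen
        -- B's selected index and edge
        have hiv : PySem.List.pyGetD lst (m2 : Int) 0 = (ix : Int) := by
          rw [hi, ← hx1, hix]
        have hEi : PySem.List.pyGetD E ((ix : Nat) : Int) (0, 0) = x.2 := by
          rw [← hix]; exact hxE
        -- next vertex agreement
        have hnv : (if x.2.1 != cur then x.2.1 else x.2.2)
            = (if x.2.1 == cur then x.2.2 else x.2.1) := by
          by_cases h : x.2.1 = cur <;> simp [h]
        -- pointer invariant is preserved
        have hincnn : ∀ (w : Int), ∀ a ∈ pvInc E w, 0 ≤ a := by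
          intro w a hmem
          unfold pvInc at hmem
          obtain ⟨y, hy, hyy⟩ := List.mem_map.mp hmem
          rw [← hyy]
          exact (pv_mem_enumerate (List.mem_of_mem_filter hy)).1
        have hinv' : pvPtrInv E (ptr.insert cur ((m2 : Int) + 1))
            (PySem.List.pySetD removed (ix : Int) true) := by
          intro w
          by_cases hw : w = cur
          · subst hw
            refine ⟨m2 + 1, ?_, ?_, ?_⟩
            · rw [PySem.Dict.getD_insert, if_pos rfl]; push_cast; ring
            · rw [← hlst]; omega
            · intro j hj
              rcases Nat.lt_succ_iff_lt_or_eq.mp hj with h | h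
              · have h2 := hall j (by omega)
                rw [← hlst]
                have hnn : 0 ≤ PySem.List.pyGetD lst (j : Int) 0 := by
                  rw [pv_getD_nat lst j (by omega)]
                  exact hincnn _ _ (by rw [← hlst]; exact List.getElem_mem (by omega))
                exact hmono _ hnn h2
              · subst h
                rw [← hlst, hiv, pv_getD_setD removed ix hsetlen _ (by positivity), if_pos rfl]
          · obtain ⟨mw, h1, h2, h3⟩ := hinv w
            refine ⟨mw, ?_, h2, ?_⟩
            · rw [PySem.Dict.getD_insert, if_neg hw]; exact h1
            · intro j hj
              have hnn : 0 ≤ PySem.List.pyGetD (pvInc E w) (j : Int) 0 := by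
                rw [pv_getD_nat (pvInc E w) j (by omega)]
                exact hincnn w _ (List.getElem_mem (by omega))
              exact hmono _ hnn (h3 j hj)
        -- reduce A's step
        rw [pvCreatePath, hpath]
        simp only [hfe, hidx, hslice]
        simp only [← hrem']
        -- reduce B's step
        simp only [hiv, hEi]
        rw [show (if x.2.1 == cur then x.2.2 else x.2.1) = (if x.2.1 != cur then x.2.1 else x.2.2) from hnv.symm]
        set nv := (if x.2.1 != cur then x.2.1 else x.2.2) with hnvdef
        have hIH := ih (PySem.List.pySetD removed (ix : Int) true)
            (ptr.insert cur ((m2 : Int) + 1)) nv (path ++ [nv]) hlen' hk'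
            (PySem.List.pyGet?_neg_one_append_singleton path nv) hinv'
        by_cases hre : pvRem E (PySem.List.pySetD removed (ix : Int) true) = []
        · rw [if_pos hre]
          have hk0 : k = 0 := by rw [← hk', hre]; rfl
          subst hk0
          rfl
        · rw [if_neg hre, hIH]

theorem pv_main : ∀ (edges : List (Int × Int)), edges ≠ [] → pvBOne edges =
    pvCreatePath edges.length edges [(edges.headI.1)] := by
  intro edges hne
  match edges, hne with
  | (a, b) :: tl, _ =>
    unfold pvBOne
    simp only [List.headI]
    have hadj := fun w => pv_adj_getD ((a, b) :: tl) w
    have hrem : pvRem ((a, b) :: tl) (List.replicate ((a, b) :: tl).length false) = (a, b) :: tl := by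
      unfold pvRem pvLiveAll
      have hall : ∀ q ∈ PySem.List.enumerate ((a, b) :: tl),
          (pvLive (List.replicate ((a, b) :: tl).length false) q.1) = true := by
        intro q _
        unfold pvLive
        rw [pv_pyGetD_replicate_false]
        rfl
      rw [List.filter_eq_self.mpr hall, PySem.List.map_snd_enumerate]
    have hinv : pvPtrInv ((a, b) :: tl) PySem.Dict.empty
        (List.replicate ((a, b) :: tl).length false) := by
      intro w
      exact ⟨0, by simp [PySem.Dict.getD_empty], by omega, fun j hj => absurd hj (by omega)⟩
    have hl := pv_loop ((a, b) :: tl) _ hadj ((a, b) :: tl).length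
      (List.replicate ((a, b) :: tl).length false) PySem.Dict.empty a [a]
      (by simp) (by rw [hrem]) (by rw [PySem.List.pyGet?_neg_one]; rfl) hinv
    rw [hrem] at hl
    exact hl.symm

-- ===== VERDICT (by name: the statement is the Claim_ definition above) =====

theorem start_paths_py_spec : Claim_equal_start_paths_py := by
  unfold Claim_equal_start_paths_py
  intro es hdom hpre
  unfold Spec_start_paths_py
  induction es with
  | nil => rfl
  | cons edges rest ih =>
    have hdomr : Dom_start_paths_py rest := by
      unfold Dom_start_paths_py at hdom ⊢
      simp only [List.all_cons, Bool.and_eq_true] at hdom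
      exact hdom.2
    have hprer : Pre_start_paths_py rest := fun e he => hpre e (List.mem_cons_of_mem _ he)
    have hr := ih hdomr hprer
    have hne : edges ≠ [] := hpre edges (by simp)
    have hmain := pv_main edges hne
    match edges, hne with
    | (a, b) :: tl, _ =>
      simp only [start_paths_py, start_paths_py_alt, hmain, List.headI]
      split_ifs with h
      · rfl
      · exact hr
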